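-- pv_equiv track=rewrite | github.com/jeffwang4321/Leetcode | companies/InstaCart/simulate_fall.py | simulate_fall
-- ===== SOURCE A (Python) =====
-- from typing import List
--
-- def simulate_fall(matrix: List[List[str]]) -> List[List[str]]:
--     # matrix = [row[:] for row in matrix]  # Create a copy of the matrix
--     while True:
--         shape = get_shape(matrix)
--         if not shape:  # If shape is empty,
--             break
--         if can_fall(matrix, shape):
--             move_shape(matrix, shape)
--         else:
--             break
--     return matrix
--
-- def can_fall(matrix, shape):
--     rows = len(matrix)
--     for row, col in shape:
--         if row + 1 >= rows or matrix[row + 1][col] == "#":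
--             return False
--     return True
--
-- def move_shape(matrix, shape):  # Move shape down by 1 unit
--     # Clear current shape positions
--     for row, col in shape:
--         matrix[row][col] = "-"
--     # Place shape in the new position
--     for row, col in shape:
--         matrix[row + 1][col] = "F"
--
-- def get_shape(matrix):  # Get the index positions of the falling shape
--     return [(row, col) for row in range(len(matrix)) for col in range(len(matrix[0])) if matrix[row][col] == "F"]
-- ===== SOURCE B (Python) =====
-- def simulate_fall(matrix):
--     rows = len(matrix)
--     cols = len(matrix[0]) if matrix else 0
--     fcells = [(r, c) for r, line in enumerate(matrix)
--                      for c, v in enumerate(line[:cols]) if v == "F"]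
--     if not fcells:
--         return matrix
--     def limit(r, c):
--         b = r + 1
--         while b < rows and matrix[b][c] != "#":
--             b += 1
--         return b - r - 1
--     d = min(limit(r, c) for r, c in fcells)
--     fset = set(fcells)
--     return [["F" if (i - d, j) in fset
--              else "-" if any((r, j) in fset for r in range(i - d, i + 1))
--              else v
--              for j, v in enumerate(line)]
--             for i, line in enumerate(matrix)]
-- ===== Notes on version B (the rewrite author's own statement) =====
-- stated objective: alternative
-- what changed: A repeatedly rescans the whole grid for the shape and moves it down one row per iteration of a while-loop; B locates the F cells once, computes the drop distance d as the minimum per-cell distance to the first '#' (or the floor) below, and writes the final grid in a single pass.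
import Mathlib
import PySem

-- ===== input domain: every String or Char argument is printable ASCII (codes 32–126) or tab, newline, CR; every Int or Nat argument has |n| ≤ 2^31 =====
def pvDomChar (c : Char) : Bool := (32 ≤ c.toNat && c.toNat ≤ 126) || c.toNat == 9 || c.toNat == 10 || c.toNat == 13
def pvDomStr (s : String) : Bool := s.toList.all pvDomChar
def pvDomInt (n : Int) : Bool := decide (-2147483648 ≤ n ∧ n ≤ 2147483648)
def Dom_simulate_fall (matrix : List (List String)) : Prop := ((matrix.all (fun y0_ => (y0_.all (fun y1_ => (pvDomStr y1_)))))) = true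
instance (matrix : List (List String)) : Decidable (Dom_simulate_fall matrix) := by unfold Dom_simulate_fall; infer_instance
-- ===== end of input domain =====

-- B replaces A's step-by-step whole-grid simulation (rescan shape, test, move by 1, repeat) by: find the
-- 'F' cells once, compute the drop distance d as the minimum per-cell distance to the first '#'/floor below,
-- and emit the final grid in one pass.  Equivalence is about the RETURN value only: A mutates its argument
-- in place, B builds a fresh grid.

-- ===== PORT A =====
def cellA (m : List (List String)) (r c : Nat) : String := (m.getD r []).getD c ""

def get_shape (m : List (List String)) : List (Nat × Nat) :=
  (List.range m.length).flatMap (fun r =>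
    (List.range (m.headD []).length).filterMap (fun c =>
      if cellA m r c = "F" then some (r, c) else none))

def can_fall (m : List (List String)) (s : List (Nat × Nat)) : Bool :=
  s.all (fun p => decide (p.1 + 1 < m.length) && decide (cellA m (p.1 + 1) p.2 ≠ "#"))

def setCell (m : List (List String)) (r c : Nat) (v : String) : List (List String) :=
  m.set r ((m.getD r []).set c v)

def move_shape (m : List (List String)) (s : List (Nat × Nat)) : List (List String) :=
  let m1 := s.foldl (fun g p => setCell g p.1 p.2 "-") m
  s.foldl (fun g p => setCell g (p.1 + 1) p.2 "F") m1

-- the 'while True' loop; each iteration moves the shape one row down, so matrix.length + 1 rounds always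
-- reach the 'break' (fuel only makes the same computation total)
def fallLoop : Nat → List (List String) → List (List String)
  | 0, m => m
  | fuel + 1, m =>
    let s := get_shape m
    if s = [] then m
    else if can_fall m s then fallLoop fuel (move_shape m s) else m

def simulate_fall (matrix : List (List String)) : List (List String) :=
  fallLoop (matrix.length + 1) matrix

-- ===== PORT B =====
-- first row b' ≥ b of column c that holds "#", else rows   (B's 'while b < rows and matrix[b][c] != "#"')
def firstBlock (m : List (List String)) (rows c b : Nat) : Nat :=
  if h : b < rows then
    (if cellA m b c ≠ "#" then firstBlock m rows c (b + 1) else b)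
  else b
termination_by rows - b
decreasing_by omega

def fcellsB (m : List (List String)) (cols : Nat) : List (Nat × Nat) :=
  (List.range m.length).flatMap (fun r =>
    (List.range ((m.getD r []).take cols).length).filterMap (fun c =>
      if ((m.getD r []).take cols).getD c "" = "F" then some (r, c) else none))

-- the final-grid comprehension of Source B: cell (i,j) becomes 'F' if an F lands there, '-' if an F vacated or
-- passed through it, else keeps its value
def paint (m : List (List String)) (F : List (Nat × Nat)) (d : Nat) : List (List String) :=
  (List.range m.length).map (fun i =>
    (List.range (m.getD i []).length).map (fun j =>
      if d ≤ i ∧ (i - d, j) ∈ F then "F"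
      else if (List.range' (i - d) (i + 1 - (i - d))).any (fun r => decide ((r, j) ∈ F)) then "-"
      else (m.getD i []).getD j ""))

def simulate_fall_alt (matrix : List (List String)) : List (List String) :=
  let rows := matrix.length
  let cols := (matrix.headD []).length
  let fcells := fcellsB matrix cols
  if fcells = [] then matrix
  else
    let d := match fcells.map (fun p => firstBlock matrix rows p.2 (p.1 + 1) - (p.1 + 1)) with
             | [] => 0
             | x :: xs => xs.foldl min x
    paint matrix fcells d

-- ===== PRECONDITION & SPEC =====
-- Pre_ excludes exactly the inputs where A raises IndexError: a row shorter than the first row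
-- (get_shape indexes every row at all columns of the first row).
def Pre_simulate_fall (matrix : List (List String)) : Prop :=
  ∀ row ∈ matrix, (matrix.headD []).length ≤ row.length
instance (matrix : List (List String)) : Decidable (Pre_simulate_fall matrix) := by
  unfold Pre_simulate_fall; infer_instance

def pvWitness_simulate_fall : List (List String) :=
  [["F", "-"], ["-", "-"], ["#", "-"]]

def Spec_simulate_fall (matrix : List (List String)) (out : List (List String)) : Prop := out = simulate_fall_alt matrix
instance (matrix : List (List String)) (out : List (List String)) : Decidable (Spec_simulate_fall matrix out) := by unfold Spec_simulate_fall; infer_instance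

-- ===== CLAIM (what is proved, stated in full; the proofs are below) =====
def Claim_equal_simulate_fall : Prop := ∀ (matrix : List (List String)), Dom_simulate_fall matrix → Pre_simulate_fall matrix → Spec_simulate_fall matrix (simulate_fall matrix)

-- ===== LEMMAS AND PROOFS =====

lemma length_setCell (g : List (List String)) (r c : Nat) (v : String) :
    (setCell g r c v).length = g.length := by
  simp [setCell]


lemma rowlen_setCell (g : List (List String)) (r c : Nat) (v : String) (i : Nat) :
    ((setCell g r c v).getD i []).length = (g.getD i []).length := by
  simp only [setCell, List.getD_eq_getElem?_getD, List.getElem?_set]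
  split
  · rename_i h; subst h
    split
    · rename_i h2; simp [List.getElem?_eq_getElem h2]
    · rename_i h2; simp [List.getElem?_eq_none (by omega : g.length ≤ r)]
  · rfl

lemma cell_setCell (g : List (List String)) (r c : Nat) (v : String) (i j : Nat)
    (hr : r < g.length) (hc : c < (g.getD r []).length) :
    cellA (setCell g r c v) i j = if r = i ∧ c = j then v else cellA g i j := by
  simp only [cellA, setCell, List.getD_eq_getElem?_getD, List.getElem?_set]
  by_cases h : r = i
  · subst h
    simp only [if_pos hr, if_pos rfl, Option.getD_some, List.getElem?_set]
    by_cases h2 : c = j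
    · subst h2
      rw [List.getD_eq_getElem?_getD] at hc
      simp [hc]
    · simp [h2]
  · simp [h]

lemma grid_ext (g1 g2 : List (List String)) (hlen : g1.length = g2.length)
    (hrow : ∀ i, (g1.getD i []).length = (g2.getD i []).length)
    (hcell : ∀ i j, cellA g1 i j = cellA g2 i j) : g1 = g2 := by
  apply List.ext_getElem hlen
  intro i h1 h2
  apply List.ext_getElem
  · have := hrow i
    simpa [List.getD_eq_getElem?_getD, List.getElem?_eq_getElem h1, List.getElem?_eq_getElem h2] using this
  · intro j hj1 hj2
    have := hcell i j
    simp only [cellA, List.getD_eq_getElem?_getD, List.getElem?_eq_getElem h1,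
      List.getElem?_eq_getElem h2, Option.getD_some] at this
    simpa [List.getD_eq_getElem?_getD, List.getElem?_eq_getElem hj1, List.getElem?_eq_getElem hj2] using this

lemma cell_foldl_set (off : Nat) (v : String) (s : List (Nat × Nat)) (g : List (List String))
    (hv : ∀ p ∈ s, p.1 + off < g.length ∧ p.2 < (g.getD (p.1 + off) []).length) (i j : Nat) :
    cellA (s.foldl (fun g p => setCell g (p.1 + off) p.2 v) g) i j =
      if ∃ p ∈ s, p.1 + off = i ∧ p.2 = j then v else cellA g i j := by
  induction s generalizing g with
  | nil => simp
  | cons p t ih =>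
    rw [List.foldl_cons]
    have hp := hv p (List.mem_cons_self)
    rw [ih]
    · rw [cell_setCell g (p.1+off) p.2 v i j hp.1 hp.2]
      by_cases h1 : p.1 + off = i ∧ p.2 = j
      · have hex : ∃ q ∈ p :: t, q.1 + off = i ∧ q.2 = j := ⟨p, List.mem_cons_self, h1⟩
        rw [if_pos h1, if_pos hex]
        split <;> rfl
      · rw [if_neg h1]
        by_cases h2 : ∃ q ∈ t, q.1 + off = i ∧ q.2 = j
        · obtain ⟨q, hq, hqe⟩ := h2
          rw [if_pos ⟨q, hq, hqe⟩, if_pos ⟨q, List.mem_cons_of_mem _ hq, hqe⟩]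
        · rw [if_neg h2, if_neg]
          rintro ⟨q, hq, hqe⟩
          rcases List.mem_cons.mp hq with h | h
          · exact h1 (h ▸ hqe)
          · exact h2 ⟨q, h, hqe⟩
    · intro q hq
      have := hv q (List.mem_cons_of_mem _ hq)
      constructor
      · rw [setCell]; simpa using this.1
      · rw [rowlen_setCell]; exact this.2


lemma length_foldl_set (off : Nat) (v : String) (s : List (Nat × Nat)) (g : List (List String)) :
    (s.foldl (fun g p => setCell g (p.1 + off) p.2 v) g).length = g.length := by
  induction s generalizing g with
  | nil => rfl
  | cons p t ih => rw [List.foldl_cons, ih, length_setCell]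

lemma rowlen_foldl_set (off : Nat) (v : String) (s : List (Nat × Nat)) (g : List (List String)) (i : Nat) :
    ((s.foldl (fun g p => setCell g (p.1 + off) p.2 v) g).getD i []).length = (g.getD i []).length := by
  induction s generalizing g with
  | nil => rfl
  | cons p t ih => rw [List.foldl_cons, ih, rowlen_setCell]

lemma length_paint (m : List (List String)) (F : List (Nat × Nat)) (d : Nat) :
    (paint m F d).length = m.length := by
  simp [paint]

lemma getD_map_range (n i : Nat) {α : Type} (dflt : α) (f : Nat → α) (h : i < n) :
    ((List.range n).map f).getD i dflt = f i := by
  rw [List.getD_eq_getElem?_getD]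
  simp [List.getElem?_map, List.getElem?_range h]

lemma rowlen_paint (m : List (List String)) (F : List (Nat × Nat)) (d i : Nat) :
    ((paint m F d).getD i []).length = if i < m.length then (m.getD i []).length else 0 := by
  by_cases h : i < m.length
  · rw [paint, getD_map_range _ _ _ _ h, if_pos h]; simp
  · rw [if_neg h, List.getD_eq_getElem?_getD, List.getElem?_eq_none]
    · rfl
    · simp [paint]; omega

lemma cell_paint_eq (m : List (List String)) (F : List (Nat × Nat)) (d i j : Nat)
    (hi : i < m.length) (hj : j < (m.getD i []).length) :
    cellA (paint m F d) i j =
      if d ≤ i ∧ (i - d, j) ∈ F then "F"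
      else if ((List.range' (i - d) (i + 1 - (i - d))).any fun r => decide ((r, j) ∈ F)) = true then "-"
      else cellA m i j := by
  rw [cellA, paint, getD_map_range _ _ _ _ hi, getD_map_range _ _ _ _ hj]
  rfl

lemma window_iff (F : List (Nat × Nat)) (d i j : Nat) :
    (((List.range' (i - d) (i + 1 - (i - d))).any fun r => decide ((r, j) ∈ F)) = true) ↔
      ∃ r, i - d ≤ r ∧ r ≤ i ∧ (r, j) ∈ F := by
  rw [List.any_eq_true]
  constructor
  · rintro ⟨r, hr, hm⟩
    rw [List.mem_range'_1] at hr
    exact ⟨r, hr.1, by omega, of_decide_eq_true hm⟩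
  · rintro ⟨r, h1, h2, hm⟩
    exact ⟨r, List.mem_range'_1.mpr ⟨h1, by omega⟩, decide_eq_true hm⟩

lemma cell_paint_final (m : List (List String)) (F : List (Nat × Nat)) (d i j : Nat)
    (hi : i < m.length) (hj : j < (m.getD i []).length)
    (h : d ≤ i ∧ (i - d, j) ∈ F) : cellA (paint m F d) i j = "F" := by
  rw [cell_paint_eq m F d i j hi hj, if_pos h]

lemma cell_paint_pass (m : List (List String)) (F : List (Nat × Nat)) (d i j : Nat)
    (hi : i < m.length) (hj : j < (m.getD i []).length)
    (h1 : ¬(d ≤ i ∧ (i - d, j) ∈ F)) (h2 : ∃ r, i - d ≤ r ∧ r ≤ i ∧ (r, j) ∈ F) :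
    cellA (paint m F d) i j = "-" := by
  rw [cell_paint_eq m F d i j hi hj, if_neg h1, if_pos ((window_iff F d i j).mpr h2)]

lemma cell_paint_keep (m : List (List String)) (F : List (Nat × Nat)) (d i j : Nat)
    (hi : i < m.length) (hj : j < (m.getD i []).length)
    (h1 : ¬(d ≤ i ∧ (i - d, j) ∈ F)) (h2 : ¬∃ r, i - d ≤ r ∧ r ≤ i ∧ (r, j) ∈ F) :
    cellA (paint m F d) i j = cellA m i j := by
  rw [cell_paint_eq m F d i j hi hj, if_neg h1, if_neg]
  exact fun hw => h2 ((window_iff F d i j).mp hw)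

lemma mem_get_shape (m : List (List String)) (i j : Nat) :
    (i, j) ∈ get_shape m ↔ i < m.length ∧ j < (m.headD []).length ∧ cellA m i j = "F" := by
  simp only [get_shape, List.mem_flatMap, List.mem_filterMap, List.mem_range]
  constructor
  · rintro ⟨r, hr, c, hc, he⟩
    split at he
    · rename_i hF
      obtain ⟨rfl, rfl⟩ : r = i ∧ c = j := by
        injection he with h'; exact ⟨congrArg Prod.fst h', congrArg Prod.snd h'⟩
      exact ⟨hr, hc, hF⟩
    · simp at he
  · rintro ⟨h1, h2, h3⟩
    exact ⟨i, h1, j, h2, by rw [if_pos h3]⟩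

lemma foldl_min_le (x : Nat) (xs : List Nat) : ∀ y ∈ x :: xs, xs.foldl min x ≤ y := by
  induction xs generalizing x with
  | nil => intro y hy; rw [List.mem_singleton] at hy; subst hy; simp
  | cons a t ih =>
    intro y hy
    rw [List.foldl_cons]
    rcases List.mem_cons.mp hy with h | h
    · subst h
      exact le_trans (ih (min y a) (min y a) List.mem_cons_self) (Nat.min_le_left y a)
    · rcases List.mem_cons.mp h with h2 | h2
      · subst h2
        exact le_trans (ih (min x y) (min x y) List.mem_cons_self) (Nat.min_le_right x y)
      · exact ih (min x a) y (List.mem_cons_of_mem _ h2)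

lemma foldl_min_mem (x : Nat) (xs : List Nat) : xs.foldl min x ∈ x :: xs := by
  induction xs generalizing x with
  | nil => simp
  | cons a t ih =>
    rw [List.foldl_cons]
    rcases List.mem_cons.mp (ih (min x a)) with h | h
    · rcases Nat.le_total x a with h2 | h2
      · rw [h, Nat.min_eq_left h2]; exact List.mem_cons_self
      · rw [h, Nat.min_eq_right h2]; exact List.mem_cons_of_mem _ List.mem_cons_self
    · exact List.mem_cons_of_mem _ (List.mem_cons_of_mem _ h)

lemma firstBlock_ge (m : List (List String)) (rows c b : Nat) : b ≤ firstBlock m rows c b := by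
  fun_induction firstBlock with
  | case1 b h hne ih => omega
  | case2 b h hne => omega
  | case3 b h => omega

lemma firstBlock_le (m : List (List String)) (rows c b : Nat) (h0 : b ≤ rows) :
    firstBlock m rows c b ≤ rows := by
  fun_induction firstBlock with
  | case1 b h hne ih => exact ih (by omega)
  | case2 b h hne => omega
  | case3 b h => omega

lemma firstBlock_before (m : List (List String)) (rows c b : Nat) :
    ∀ x, b ≤ x → x < firstBlock m rows c b → x < rows ∧ cellA m x c ≠ "#" := by
  fun_induction firstBlock with
  | case1 b h hne ih =>
    intro x hx1 hx2
    rcases Nat.eq_or_lt_of_le hx1 with he | hl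
    · subst he; exact ⟨h, hne⟩
    · exact ih x hl hx2
  | case2 b h hne => intro x hx1 hx2; omega
  | case3 b h => intro x hx1 hx2; omega

lemma firstBlock_hit (m : List (List String)) (rows c b : Nat)
    (h0 : firstBlock m rows c b < rows) : cellA m (firstBlock m rows c b) c = "#" := by
  fun_induction firstBlock with
  | case1 b h hne ih => exact ih h0
  | case2 b h hne => simpa using hne
  | case3 b h => omega

lemma cellA_oob (g : List (List String)) (i j : Nat)
    (h : g.length ≤ i ∨ (g.getD i []).length ≤ j) : cellA g i j = "" := by
  have hj : (g.getD i []).length ≤ j := by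
    rcases h with h | h
    · have he : g.getD i [] = [] := by
        rw [List.getD_eq_getElem?_getD, List.getElem?_eq_none h]; rfl
      rw [he]; exact Nat.zero_le j
    · exact h
  rw [cellA, List.getD_eq_getElem?_getD, List.getElem?_eq_none hj]; rfl

-- out-of-range cells are "" on both sides, so cell agreement in range suffices
lemma grid_ext' (g1 g2 : List (List String)) (hlen : g1.length = g2.length)
    (hrow : ∀ i, (g1.getD i []).length = (g2.getD i []).length)
    (hin : ∀ i j, i < g1.length → j < (g1.getD i []).length → cellA g1 i j = cellA g2 i j) :
    g1 = g2 := by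
  apply grid_ext g1 g2 hlen hrow
  intro i j
  by_cases hi : i < g1.length
  · by_cases hj : j < (g1.getD i []).length
    · exact hin i j hi hj
    · rw [cellA_oob g1 i j (Or.inr (by omega)), cellA_oob g2 i j (Or.inr (by rw [← hrow i]; omega))]
  · rw [cellA_oob g1 i j (Or.inl (by omega)), cellA_oob g2 i j (Or.inl (by omega))]

lemma rowlen_ge (m : List (List String)) (hpre : Pre_simulate_fall m) (i : Nat) (hi : i < m.length) :
    (m.headD []).length ≤ (m.getD i []).length := by
  apply hpre
  rw [List.getD_eq_getElem?_getD, List.getElem?_eq_getElem hi]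
  exact List.getElem_mem hi

lemma headD_getD (m : List (List String)) : m.headD [] = m.getD 0 [] := by
  cases m <;> rfl

-- B's shape scan equals A's under Pre_
lemma fcells_eq (m : List (List String)) (hpre : Pre_simulate_fall m) :
    fcellsB m ((m.headD []).length) = get_shape m := by
  apply List.flatMap_congr
  intro r hr
  rw [List.mem_range] at hr
  have hC : (m.headD []).length ≤ (m.getD r []).length := rowlen_ge m hpre r hr
  have hlen : ((m.getD r []).take (m.headD []).length).length = (m.headD []).length := by
    rw [List.length_take]; omega
  rw [hlen]
  apply List.filterMap_congr
  intro c hc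
  rw [List.mem_range] at hc
  have hgd : ((m.getD r []).take (m.headD []).length).getD c "" = (m.getD r []).getD c "" := by
    simp only [List.getD_eq_getElem?_getD, List.getElem?_take, if_pos hc]
  rw [hgd, cellA]

-- distance of an F cell to its stop position (Source B's 'limit')
def limF (m : List (List String)) (p : Nat × Nat) : Nat :=
  firstBlock m m.length p.2 (p.1 + 1) - (p.1 + 1)

lemma mem_get_shape' (m : List (List String)) (p : Nat × Nat) :
    p ∈ get_shape m ↔ p.1 < m.length ∧ p.2 < (m.headD []).length ∧ cellA m p.1 p.2 = "F" := by
  obtain ⟨i, j⟩ := p; exact mem_get_shape m i j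

lemma fb_eq (m : List (List String)) (p : Nat × Nat) :
    firstBlock m m.length p.2 (p.1 + 1) = p.1 + 1 + limF m p := by
  have h1 := firstBlock_ge m m.length p.2 (p.1 + 1)
  rw [limF]; omega

lemma limF_lt (m : List (List String)) (p : Nat × Nat) (hp : p ∈ get_shape m) :
    p.1 + limF m p < m.length := by
  have h0 : p.1 < m.length := ((mem_get_shape' m p).mp hp).1
  have hle := firstBlock_le m m.length p.2 (p.1 + 1) (by omega)
  have := fb_eq m p
  omega

lemma step_free (m : List (List String)) (p : Nat × Nat) (k : Nat) (hp : p ∈ get_shape m)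
    (hk : k < limF m p) : p.1 + k + 1 < m.length ∧ cellA m (p.1 + k + 1) p.2 ≠ "#" := by
  apply firstBlock_before m m.length p.2 (p.1 + 1) (p.1 + k + 1) (by omega)
  rw [fb_eq m p]; omega

lemma step_block (m : List (List String)) (p : Nat × Nat) (hp : p ∈ get_shape m) :
    ¬(p.1 + limF m p + 1 < m.length ∧ cellA m (p.1 + limF m p + 1) p.2 ≠ "#") := by
  rintro ⟨h1, h2⟩
  have hfb := fb_eq m p
  have hhit := firstBlock_hit m m.length p.2 (p.1 + 1) (by omega)
  rw [hfb] at hhit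
  have harr : p.1 + 1 + limF m p = p.1 + limF m p + 1 := by omega
  rw [harr] at hhit
  exact h2 hhit

lemma fb_min (m : List (List String)) (p : Nat × Nat) (x : Nat) (hx : p.1 + 1 ≤ x)
    (hblock : m.length ≤ x ∨ cellA m x p.2 = "#") : firstBlock m m.length p.2 (p.1 + 1) ≤ x := by
  by_contra h
  push_neg at h
  have := firstBlock_before m m.length p.2 (p.1 + 1) x hx (by omega)
  rcases hblock with hb | hb
  · omega
  · exact this.2 hb

lemma visited_not_hash (m : List (List String)) (d k i j : Nat)
    (hdle : ∀ p ∈ get_shape m, d ≤ limF m p) (hk : k ≤ d)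
    (hw : ∃ r, i - k ≤ r ∧ r ≤ i ∧ (r, j) ∈ get_shape m) : cellA m i j ≠ "#" := by
  obtain ⟨r, h1, h2, hm⟩ := hw
  rcases Nat.eq_or_lt_of_le h2 with he | hl
  · subst he
    rw [((mem_get_shape m r j).mp hm).2.2]
    decide
  · intro hhash
    have hfb : firstBlock m m.length (r, j).2 ((r, j).1 + 1) ≤ i :=
      fb_min m (r, j) i (show r + 1 ≤ i by omega) (Or.inr hhash)
    rw [fb_eq m (r, j)] at hfb
    have hfb' : r + 1 + limF m (r, j) ≤ i := hfb
    have hd : d ≤ limF m (r, j) := hdle (r, j) hm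
    omega

lemma hash_iff (m : List (List String)) (d k i j : Nat)
    (hdle : ∀ p ∈ get_shape m, d ≤ limF m p) (hk : k ≤ d)
    (hi : i < m.length) (hj : j < (m.getD i []).length) :
    cellA (paint m (get_shape m) k) i j = "#" ↔ cellA m i j = "#" := by
  by_cases h1 : k ≤ i ∧ (i - k, j) ∈ get_shape m
  · rw [cell_paint_final m _ k i j hi hj h1]
    have hnot := visited_not_hash m d k i j hdle hk ⟨i - k, le_refl _, Nat.sub_le i k, h1.2⟩
    constructor
    · intro h; exact absurd h (by decide)
    · intro h; exact absurd h hnot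
  · by_cases h2 : ∃ r, i - k ≤ r ∧ r ≤ i ∧ (r, j) ∈ get_shape m
    · rw [cell_paint_pass m _ k i j hi hj h1 h2]
      have hnot := visited_not_hash m d k i j hdle hk h2
      constructor
      · intro h; exact absurd h (by decide)
      · intro h; exact absurd h hnot
    · rw [cell_paint_keep m _ k i j hi hj h1 h2]

lemma shape_paint (m : List (List String)) (d k : Nat) (hpre : Pre_simulate_fall m)
    (hdle : ∀ p ∈ get_shape m, d ≤ limF m p) (hk : k ≤ d) (i j : Nat) :
    (i, j) ∈ get_shape (paint m (get_shape m) k) ↔ k ≤ i ∧ (i - k, j) ∈ get_shape m := by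
  rw [mem_get_shape, length_paint]
  have hhead : ((paint m (get_shape m) k).headD []).length =
      if 0 < m.length then (m.getD 0 []).length else 0 := by
    rw [headD_getD, rowlen_paint]
  constructor
  · rintro ⟨h1, h2, h3⟩
    rw [hhead, if_pos (by omega), ← headD_getD] at h2
    have hj : j < (m.getD i []).length := lt_of_lt_of_le h2 (rowlen_ge m hpre i h1)
    by_cases c1 : k ≤ i ∧ (i - k, j) ∈ get_shape m
    · exact c1
    · by_cases c2 : ∃ r, i - k ≤ r ∧ r ≤ i ∧ (r, j) ∈ get_shape m
      · rw [cell_paint_pass m _ k i j h1 hj c1 c2] at h3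
        exact absurd h3 (by decide)
      · rw [cell_paint_keep m _ k i j h1 hj c1 c2] at h3
        have hmem : (i, j) ∈ get_shape m := (mem_get_shape m i j).mpr ⟨h1, h2, h3⟩
        exact absurd (⟨i, Nat.sub_le i k, le_refl i, hmem⟩ :
          ∃ r, i - k ≤ r ∧ r ≤ i ∧ (r, j) ∈ get_shape m) c2
  · rintro ⟨h1, h2⟩
    have hm := (mem_get_shape m (i - k) j).mp h2
    have hlim : (i - k) + limF m (i - k, j) < m.length := limF_lt m (i - k, j) h2
    have hd : d ≤ limF m (i - k, j) := hdle (i - k, j) h2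
    have hi : i < m.length := by omega
    have hj : j < (m.getD i []).length := lt_of_lt_of_le hm.2.1 (rowlen_ge m hpre i hi)
    refine ⟨hi, ?_, ?_⟩
    · rw [hhead, if_pos (by omega), ← headD_getD]; exact hm.2.1
    · exact cell_paint_final m _ k i j hi hj ⟨h1, h2⟩

lemma shape_ne (m : List (List String)) (d k : Nat) (hpre : Pre_simulate_fall m)
    (hdle : ∀ p ∈ get_shape m, d ≤ limF m p) (hF : get_shape m ≠ []) (hk : k ≤ d) :
    get_shape (paint m (get_shape m) k) ≠ [] := by
  obtain ⟨p, hp⟩ := List.exists_mem_of_ne_nil _ hF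
  apply List.ne_nil_of_mem (a := (p.1 + k, p.2))
  rw [shape_paint m d k hpre hdle hk]
  refine ⟨by omega, ?_⟩
  have harr : p.1 + k - k = p.1 := by omega
  rw [harr]
  exact (Prod.mk.eta (p := p)) ▸ hp

lemma conj_iff (m : List (List String)) (d k : Nat) (q : Nat × Nat) (hpre : Pre_simulate_fall m)
    (hdle : ∀ p ∈ get_shape m, d ≤ limF m p) (hk : k ≤ d) (hq : q ∈ get_shape m) :
    (q.1 + k + 1 < m.length ∧ cellA (paint m (get_shape m) k) (q.1 + k + 1) q.2 ≠ "#") ↔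
      k < limF m q := by
  constructor
  · rintro ⟨h1, h2⟩
    have hj : q.2 < (m.getD (q.1 + k + 1) []).length :=
      lt_of_lt_of_le ((mem_get_shape' m q).mp hq).2.1 (rowlen_ge m hpre _ h1)
    rw [ne_eq, hash_iff m d k (q.1 + k + 1) q.2 hdle hk h1 hj] at h2
    by_contra hnk
    have hklim : k = limF m q := by have := hdle q hq; omega
    subst hklim
    exact step_block m q hq ⟨h1, h2⟩
  · intro hlt
    have hs := step_free m q k hq hlt
    refine ⟨hs.1, ?_⟩
    have hj : q.2 < (m.getD (q.1 + k + 1) []).length :=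
      lt_of_lt_of_le ((mem_get_shape' m q).mp hq).2.1 (rowlen_ge m hpre _ hs.1)
    rw [ne_eq, hash_iff m d k (q.1 + k + 1) q.2 hdle hk hs.1 hj]
    exact hs.2

lemma canfall_iff (m : List (List String)) (d k : Nat) (hpre : Pre_simulate_fall m)
    (hdle : ∀ p ∈ get_shape m, d ≤ limF m p) (hdmem : ∃ p ∈ get_shape m, limF m p = d)
    (hk : k ≤ d) :
    (can_fall (paint m (get_shape m) k) (get_shape (paint m (get_shape m) k)) = true ↔ k < d) := by
  rw [can_fall, List.all_eq_true]
  constructor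
  · intro hall
    obtain ⟨q, hq, hqd⟩ := hdmem
    have hmem : (q.1 + k, q.2) ∈ get_shape (paint m (get_shape m) k) := by
      rw [shape_paint m d k hpre hdle hk]
      refine ⟨by omega, ?_⟩
      have harr : q.1 + k - k = q.1 := by omega
      rw [harr]
      exact (Prod.mk.eta (p := q)) ▸ hq
    have h := hall (q.1 + k, q.2) hmem
    rw [Bool.and_eq_true, decide_eq_true_iff, decide_eq_true_iff, length_paint] at h
    have h' : q.1 + k + 1 < m.length ∧ cellA (paint m (get_shape m) k) (q.1 + k + 1) q.2 ≠ "#" := h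
    have := (conj_iff m d k q hpre hdle hk hq).mp h'
    omega
  · intro hlt p hp
    obtain ⟨i, j⟩ := p
    rw [shape_paint m d k hpre hdle hk] at hp
    obtain ⟨h1, h2⟩ := hp
    have hc := (conj_iff m d k (i - k, j) hpre hdle hk h2).mpr (by
      have := hdle (i - k, j) h2; omega)
    have harr : i - k + k = i := by omega
    rw [Bool.and_eq_true, decide_eq_true_iff, decide_eq_true_iff, length_paint]
    have hc' : i - k + k + 1 < m.length ∧
        cellA (paint m (get_shape m) k) (i - k + k + 1) j ≠ "#" := hc
    rw [harr] at hc'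
    exact hc'

lemma paint_zero (m : List (List String)) : paint m (get_shape m) 0 = m := by
  apply grid_ext' _ m (length_paint m _ 0)
  · intro i
    rw [rowlen_paint]
    split
    · rfl
    · rename_i h
      rw [List.getD_eq_getElem?_getD, List.getElem?_eq_none (by omega)]; rfl
  · intro i j hi hj
    rw [length_paint] at hi
    rw [rowlen_paint, if_pos hi] at hj
    by_cases c1 : 0 ≤ i ∧ (i - 0, j) ∈ get_shape m
    · rw [cell_paint_final m _ 0 i j hi hj c1]
      have hmem : (i, j) ∈ get_shape m := by
        have := c1.2; rwa [Nat.sub_zero] at this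
      exact (((mem_get_shape m i j).mp hmem).2.2).symm
    · by_cases c2 : ∃ r, i - 0 ≤ r ∧ r ≤ i ∧ (r, j) ∈ get_shape m
      · exfalso
        obtain ⟨r, hr1, hr2, hr3⟩ := c2
        have hri : r = i := by omega
        rw [hri] at hr3
        exact c1 ⟨Nat.zero_le i, by rw [Nat.sub_zero]; exact hr3⟩
      · exact cell_paint_keep m _ 0 i j hi hj c1 c2

lemma length_move (g : List (List String)) (s : List (Nat × Nat)) :
    (move_shape g s).length = g.length := by
  rw [move_shape]
  have h0 := length_foldl_set 0 "-" s g
  have h1 := length_foldl_set 1 "F" s (s.foldl (fun g p => setCell g (p.1 + 0) p.2 "-") g)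
  simp only [Nat.add_zero] at h0 h1
  rw [h1, h0]

lemma rowlen_move (g : List (List String)) (s : List (Nat × Nat)) (i : Nat) :
    ((move_shape g s).getD i []).length = (g.getD i []).length := by
  rw [move_shape]
  have h0 := rowlen_foldl_set 0 "-" s g i
  have h1 := rowlen_foldl_set 1 "F" s (s.foldl (fun g p => setCell g (p.1 + 0) p.2 "-") g) i
  simp only [Nat.add_zero] at h0 h1
  rw [h1, h0]

lemma cell_move (g : List (List String)) (s : List (Nat × Nat))
    (hv0 : ∀ p ∈ s, p.1 < g.length ∧ p.2 < (g.getD p.1 []).length)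
    (hv1 : ∀ p ∈ s, p.1 + 1 < g.length ∧ p.2 < (g.getD (p.1 + 1) []).length) (i j : Nat) :
    cellA (move_shape g s) i j =
      if ∃ p ∈ s, p.1 + 1 = i ∧ p.2 = j then "F"
      else if ∃ p ∈ s, p.1 = i ∧ p.2 = j then "-"
      else cellA g i j := by
  rw [move_shape]
  have hc0 := cell_foldl_set 0 "-" s g (by
    intro p hp; have := hv0 p hp; simpa using this) i j
  have hc1 := cell_foldl_set 1 "F" s (s.foldl (fun g p => setCell g (p.1 + 0) p.2 "-") g) (by
    intro p hp
    have := hv1 p hp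
    have hl := length_foldl_set 0 "-" s g
    have hr := rowlen_foldl_set 0 "-" s g (p.1 + 1)
    constructor
    · rw [hl]; exact this.1
    · rw [hr]; exact this.2) i j
  simp only [Nat.add_zero] at hc0 hc1
  rw [hc1, hc0]

lemma move_paint (m : List (List String)) (d k : Nat) (hpre : Pre_simulate_fall m)
    (hdle : ∀ p ∈ get_shape m, d ≤ limF m p) (hk : k < d) :
    move_shape (paint m (get_shape m) k) (get_shape (paint m (get_shape m) k)) =
      paint m (get_shape m) (k + 1) := by
  have hshape : ∀ i j : Nat, (i, j) ∈ get_shape (paint m (get_shape m) k) ↔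
      k ≤ i ∧ (i - k, j) ∈ get_shape m :=
    shape_paint m d k hpre hdle (by omega)
  have hv0 : ∀ p ∈ get_shape (paint m (get_shape m) k),
      p.1 < (paint m (get_shape m) k).length ∧
      p.2 < ((paint m (get_shape m) k).getD p.1 []).length := by
    rintro ⟨i, j⟩ hp
    rw [hshape i j] at hp
    obtain ⟨h1, h2⟩ := hp
    have hm := (mem_get_shape m (i - k) j).mp h2
    have hlim := limF_lt m (i - k, j) h2
    have hd := hdle (i - k, j) h2
    have hlim' : (i - k) + limF m (i - k, j) < m.length := hlim
    have hi : i < m.length := by omega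
    refine ⟨by rw [length_paint]; exact hi, ?_⟩
    rw [rowlen_paint, if_pos hi]
    exact lt_of_lt_of_le hm.2.1 (rowlen_ge m hpre i hi)
  have hv1 : ∀ p ∈ get_shape (paint m (get_shape m) k),
      p.1 + 1 < (paint m (get_shape m) k).length ∧
      p.2 < ((paint m (get_shape m) k).getD (p.1 + 1) []).length := by
    rintro ⟨i, j⟩ hp
    rw [hshape i j] at hp
    obtain ⟨h1, h2⟩ := hp
    have hd : d ≤ limF m (i - k, j) := hdle (i - k, j) h2
    have hs := step_free m (i - k, j) k h2 (by omega)
    have hs1 : i - k + k + 1 < m.length := hs.1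
    have harr : i - k + k = i := by omega
    rw [harr] at hs1
    have hm := (mem_get_shape m (i - k) j).mp h2
    refine ⟨by rw [length_paint]; exact hs1, ?_⟩
    rw [rowlen_paint, if_pos hs1]
    exact lt_of_lt_of_le hm.2.1 (rowlen_ge m hpre _ hs1)
  apply grid_ext'
  · rw [length_move, length_paint, length_paint]
  · intro i
    rw [rowlen_move, rowlen_paint, rowlen_paint]
  · intro i j hi hj
    rw [length_move, length_paint] at hi
    rw [rowlen_move, rowlen_paint, if_pos hi] at hj
    rw [cell_move _ _ hv0 hv1 i j]
    have hE1 : (∃ p ∈ get_shape (paint m (get_shape m) k), p.1 + 1 = i ∧ p.2 = j) ↔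
        (k + 1 ≤ i ∧ (i - (k + 1), j) ∈ get_shape m) := by
      constructor
      · rintro ⟨⟨a, b⟩, hp, he1, he2⟩
        rw [hshape a b] at hp
        simp only at he1 he2
        subst he2
        obtain ⟨ha, hb⟩ := hp
        refine ⟨by omega, ?_⟩
        have : i - (k + 1) = a - k := by omega
        rw [this]; exact hb
      · rintro ⟨h1, h2⟩
        refine ⟨(i - 1, j), ?_, by omega, rfl⟩
        rw [hshape (i - 1) j]
        refine ⟨by omega, ?_⟩
        have : i - 1 - k = i - (k + 1) := by omega
        rw [this]; exact h2
    have hE0 : (∃ p ∈ get_shape (paint m (get_shape m) k), p.1 = i ∧ p.2 = j) ↔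
        (k ≤ i ∧ (i - k, j) ∈ get_shape m) := by
      constructor
      · rintro ⟨⟨a, b⟩, hp, he1, he2⟩
        rw [hshape a b] at hp
        simp only at he1 he2
        subst he1; subst he2
        exact hp
      · intro h
        exact ⟨(i, j), (hshape i j).mpr h, rfl, rfl⟩
    by_cases hP1 : k + 1 ≤ i ∧ (i - (k + 1), j) ∈ get_shape m
    · rw [if_pos (hE1.mpr hP1), cell_paint_final m _ (k + 1) i j hi hj hP1]
    · rw [if_neg (fun h => hP1 (hE1.mp h))]
      by_cases hP0 : k ≤ i ∧ (i - k, j) ∈ get_shape m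
      · rw [if_pos (hE0.mpr hP0),
          cell_paint_pass m _ (k + 1) i j hi hj hP1
            ⟨i - k, by omega, Nat.sub_le i k, hP0.2⟩]
      · rw [if_neg (fun h => hP0 (hE0.mp h))]
        by_cases hW0 : ∃ r, i - k ≤ r ∧ r ≤ i ∧ (r, j) ∈ get_shape m
        · rw [cell_paint_pass m _ k i j hi hj hP0 hW0,
            cell_paint_pass m _ (k + 1) i j hi hj hP1 (by
              obtain ⟨r, hr1, hr2, hr3⟩ := hW0
              exact ⟨r, by omega, hr2, hr3⟩)]
        · rw [cell_paint_keep m _ k i j hi hj hP0 hW0,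
            cell_paint_keep m _ (k + 1) i j hi hj hP1 (by
              rintro ⟨r, hr1, hr2, hr3⟩
              by_cases hrk : i - k ≤ r
              · exact hW0 ⟨r, hrk, hr2, hr3⟩
              · apply hP1
                have h1 : k + 1 ≤ i := by omega
                have h2 : r = i - (k + 1) := by omega
                exact ⟨h1, h2 ▸ hr3⟩)]

lemma fallLoop_succ (n : Nat) (g : List (List String)) :
    fallLoop (n + 1) g =
      if get_shape g = [] then g
      else if can_fall g (get_shape g) then fallLoop n (move_shape g (get_shape g)) else g := rfl

lemma loop_paint (m : List (List String)) (d : Nat) (hpre : Pre_simulate_fall m)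
    (hdle : ∀ p ∈ get_shape m, d ≤ limF m p) (hdmem : ∃ p ∈ get_shape m, limF m p = d)
    (hF : get_shape m ≠ []) :
    ∀ n k, k ≤ d → d - k < n →
      fallLoop n (paint m (get_shape m) k) = paint m (get_shape m) d := by
  intro n
  induction n with
  | zero => intro k hk hn; omega
  | succ n ih =>
    intro k hk hn
    rw [fallLoop_succ, if_neg (shape_ne m d k hpre hdle hF hk)]
    by_cases hlt : k < d
    · rw [if_pos ((canfall_iff m d k hpre hdle hdmem hk).mpr hlt),
        move_paint m d k hpre hdle hlt]
      exact ih (k + 1) hlt (by omega)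
    · have hkd : k = d := by omega
      subst hkd
      rw [if_neg (fun hc => absurd ((canfall_iff m k k hpre hdle hdmem hk).mp hc) (by omega))]

lemma alt_empty (m : List (List String)) (h : fcellsB m ((m.headD []).length) = []) :
    simulate_fall_alt m = m := by
  have h' : fcellsB m ((m.head?.getD []).length) = [] := by
    rw [← List.headD_eq_head?_getD]; exact h
  simp [simulate_fall_alt, h']

lemma alt_cons (m : List (List String)) (hpre : Pre_simulate_fall m) (p0 : Nat × Nat)
    (t : List (Nat × Nat)) (hFeq : get_shape m = p0 :: t) :
    simulate_fall_alt m = paint m (get_shape m) ((t.map (limF m)).foldl min (limF m p0)) := by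
  simp only [simulate_fall_alt, fcells_eq m hpre, hFeq]
  rw [if_neg (by simp)]
  simp only [List.map_cons]
  rfl

-- ===== VERDICT (by name: the statement is the Claim_ definition above) =====
theorem simulate_fall_spec : Claim_equal_simulate_fall := by
  intro m _ hpre
  unfold Spec_simulate_fall
  by_cases hF : get_shape m = []
  · rw [simulate_fall, fallLoop_succ, if_pos hF,
      alt_empty m (by rw [fcells_eq m hpre]; exact hF)]
  · obtain ⟨p0, t, hFeq⟩ := List.exists_cons_of_ne_nil hF
    set dd := (t.map (limF m)).foldl min (limF m p0) with hdd
    have hdle : ∀ p ∈ get_shape m, dd ≤ limF m p := by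
      intro p hp
      apply foldl_min_le (limF m p0) (t.map (limF m))
      rw [← List.map_cons, ← hFeq]
      exact List.mem_map_of_mem hp
    have hdmem : ∃ p ∈ get_shape m, limF m p = dd := by
      have hmem := foldl_min_mem (limF m p0) (t.map (limF m))
      rw [← List.map_cons, ← hFeq] at hmem
      obtain ⟨q, hq, he⟩ := List.mem_map.mp hmem
      exact ⟨q, hq, he⟩
    have hdlt : dd ≤ m.length := by
      obtain ⟨q, hq, he⟩ := hdmem
      have := limF_lt m q hq
      omega
    have hA : fallLoop (m.length + 1) (paint m (get_shape m) 0) = paint m (get_shape m) dd :=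
      loop_paint m dd hpre hdle hdmem hF (m.length + 1) 0 (Nat.zero_le dd) (by omega)
    rw [paint_zero m] at hA
    rw [simulate_fall, hA, alt_cons m hpre p0 t hFeq]
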